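-- pv_equiv track=rewrite | github.com/claudlos/Kryptos | kryptos/transposition.py | column_order
-- ===== SOURCE A (Python) =====
-- def column_order(cells: set[tuple[int, int]], permutation: tuple[int, ...], reverse_columns: bool) -> list[tuple[int, int]]:
--     ordered: list[tuple[int, int]] = []
--     for column in permutation:
--         rows = sorted(row for row, cell_column in cells if cell_column == column)
--         if reverse_columns:
--             rows.reverse()
--         ordered.extend((row, column) for row in rows)
--     return ordered
-- ===== SOURCE B (Python) =====
-- def column_order(cells: set[tuple[int, int]], permutation: tuple[int, ...], reverse_columns: bool) -> list[tuple[int, int]]: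
--     # Group rows by column once, then each column in the permutation is a direct lookup.
--     groups: dict[int, list[int]] = {}
--     for row, column in cells:
--         groups.setdefault(column, []).append(row)
--
--     def rows_of(column: int):
--         rs = sorted(groups.get(column, ()))
--         return reversed(rs) if reverse_columns else rs
--
--     return [(row, column) for column in permutation for row in rows_of(column)]
-- ===== Notes on version B (the rewrite author's own statement) =====
-- stated objective: faster
-- what changed: Builds a column->rows dictionary in one pass over the cells, so each permutation column becomes a direct lookup instead of A's full scan of all cells per column.
import Mathlib
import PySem

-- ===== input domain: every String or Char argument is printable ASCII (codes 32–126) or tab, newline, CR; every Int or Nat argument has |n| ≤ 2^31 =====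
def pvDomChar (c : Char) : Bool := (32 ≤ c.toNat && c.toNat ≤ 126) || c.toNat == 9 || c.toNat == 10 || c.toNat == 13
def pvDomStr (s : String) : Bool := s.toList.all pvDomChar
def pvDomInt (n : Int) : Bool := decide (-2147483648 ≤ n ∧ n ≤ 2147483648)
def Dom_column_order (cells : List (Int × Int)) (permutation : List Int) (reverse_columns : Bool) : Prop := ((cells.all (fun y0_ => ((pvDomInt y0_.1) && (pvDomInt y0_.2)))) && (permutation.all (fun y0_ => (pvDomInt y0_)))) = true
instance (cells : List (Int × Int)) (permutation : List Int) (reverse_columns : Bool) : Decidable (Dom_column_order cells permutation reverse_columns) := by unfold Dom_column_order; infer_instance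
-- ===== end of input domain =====

-- B replaces A's per-column scan of all cells by a column→rows dictionary built once (faster).

-- ===== PORT A =====
-- for each column: scan all cells collecting matching rows, sort, optionally reverse, append
def column_order (cells : List (Int × Int)) (permutation : List Int) (reverse_columns : Bool) : List (Int × Int) :=
  permutation.foldl (fun ordered column =>
    ordered ++
      ((if reverse_columns
          then (PySem.List.sorted (cells.filterMap (fun rc => if rc.2 = column then some rc.1 else none)) (fun x => x) false).reverse
          else PySem.List.sorted (cells.filterMap (fun rc => if rc.2 = column then some rc.1 else none)) (fun x => x) false).map
        (fun row => (row, column)))) []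

-- ===== PORT B =====
-- one grouping pass builds groups : column → list of rows; output is a flatMap of per-column lookups
def column_order_alt (cells : List (Int × Int)) (permutation : List Int) (reverse_columns : Bool) : List (Int × Int) :=
  let groups : PySem.Dict Int (List Int) :=
    cells.foldl (fun g rc => g.insert rc.2 (g.getD rc.2 [] ++ [rc.1])) PySem.Dict.empty
  permutation.flatMap (fun column =>
    ((if reverse_columns
        then (PySem.List.sorted (groups.getD column []) (fun x => x) false).reverse
        else PySem.List.sorted (groups.getD column []) (fun x => x) false).map
      (fun row => (row, column))))

-- ===== PRECONDITION & SPEC =====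
def Spec_column_order (cells : List (Int × Int)) (permutation : List Int) (reverse_columns : Bool) (out : List (Int × Int)) : Prop := out = column_order_alt cells permutation reverse_columns
instance (cells : List (Int × Int)) (permutation : List Int) (reverse_columns : Bool) (out : List (Int × Int)) : Decidable (Spec_column_order cells permutation reverse_columns out) := by unfold Spec_column_order; infer_instance

-- ===== CLAIM (what is proved, stated in full; the proofs are below) =====
def Claim_equal_column_order : Prop := ∀ (cells : List (Int × Int)) (permutation : List Int) (reverse_columns : Bool), Dom_column_order cells permutation reverse_columns → Spec_column_order cells permutation reverse_columns (column_order cells permutation reverse_columns)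

-- ===== LEMMAS AND PROOFS =====

-- the dictionary built by B's grouping loop holds, at each key c, exactly the rows A's filter collects for c
theorem getD_buildGroups (cells : List (Int × Int)) (g : PySem.Dict Int (List Int)) (c : Int) :
    (cells.foldl (fun g rc => g.insert rc.2 (g.getD rc.2 [] ++ [rc.1])) g).getD c [] =
    g.getD c [] ++ cells.filterMap (fun rc => if rc.2 = c then some rc.1 else none) := by
  induction cells generalizing g with
  | nil => simp
  | cons rc tl ih =>
    simp only [List.foldl_cons, List.filterMap_cons, ih]
    rw [PySem.Dict.getD_insert]
    by_cases h : rc.2 = c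
    · simp [h, List.append_assoc]
    · simp [h, Ne.symm h]

-- ===== VERDICT (by name: the statement is the Claim_ definition above) =====
theorem column_order_spec : Claim_equal_column_order := by
  intro cells permutation reverse_columns _
  unfold Spec_column_order column_order column_order_alt
  rw [PySem.List.foldl_append_eq_flatMap, List.nil_append]
  congr 1
  funext column
  rw [getD_buildGroups cells PySem.Dict.empty column, PySem.Dict.getD_empty, List.nil_append]
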